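-- pv_equiv track=rewrite | github.com/naodeng/awesome-qa-skills | explore/test-strategy-plus/scripts/run_strategy.py | build_strategy
-- ===== SOURCE A (Python) =====
-- from typing import Dict, List, Tuple
--
-- def _collect_lines(text: str) -> List[str]:
--     return [x.strip() for x in text.splitlines() if x.strip()]
--
-- def _pick(lines: List[str], keywords: List[str], limit: int) -> List[str]:
--     out = []
--     for line in lines:
--         low = line.lower()
--         if any(k.lower() in low for k in keywords):
--             out.append(line)
--             if len(out) >= limit:
--                 break
--     return out
--
-- def _summary_from_docs(docs: List[Tuple[str, str]]) -> Dict[str, str]: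
--     merged_lines = []
--     for _, text in docs:
--         merged_lines.extend(_collect_lines(text))
--
--     core = _pick(merged_lines, ["必须", "应当", "required", "must", "规则", "流程", "资格", "库存"], 5)
--     perf = _pick(merged_lines, ["性能", "并发", "rps", "响应", "latency", "throughput"], 3)
--     sec = _pick(merged_lines, ["安全", "权限", "鉴权", "风控", "owasp", "token", "越权"], 3)
--     schedule = _pick(merged_lines, ["t-", "里程碑", "上线", "计划", "deadline", "release"], 4)
--
--     return {
--         "core": "；".join(core) if core else "核心业务流程、资格校验、库存一致性",
--         "perf": "；".join(perf) if perf else "高峰并发与稳定性验证",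
--         "sec": "；".join(sec) if sec else "认证鉴权、越权、数据保护",
--         "schedule": "；".join(schedule) if schedule else "按项目节奏分阶段执行与评审",
--     }
--
-- def build_strategy(prompt_text: str, docs: List[Tuple[str, str]]) -> Dict[str, str]:
--     src_names = "、".join([label for label, _ in docs])
--     summary = _summary_from_docs(docs)
--
--     strategy = {
--         "策略标题": "Test Strategy Plus 输出 - 业务活动质量保障策略",
--         "质量目标": f"保障关键链路正确性、稳定性与安全性。重点：{summary['core']}；性能关注：{summary['perf']}。",
--         "范围_包含": "资格校验、活动参与、库存扣减、订单状态联动、失败回滚、幂等控制、关键接口与前端主流程。",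
--         "范围_不包含": "非活动范围的历史模块重构验证、与当前发布无关的低风险边缘特性。",
--         "测试类型与覆盖": "功能+接口为P0，性能压测/稳定性为P1，安全与权限为P1，兼容与可访问性为P2；覆盖正常、异常、边界、并发冲突场景。",
--         "环境与工具": "独立测试环境（网关/服务/缓存/消息队列/数据库）+ API自动化 + UI回归 + 性能压测工具 + 安全扫描工具。",
--         "测试数据策略": "构造多层级用户与库存数据集，覆盖资格达标/不达标、库存充足/不足、重复提交、失败补偿；敏感数据脱敏。",
--         "准入准出标准": "准入：需求冻结、接口文档可用、环境联通；准出：P0用例通过率100%，P1通过率>=95%，阻塞缺陷清零，高风险项有结论。",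
--         "风险与缓解": f"风险：并发超卖、状态不一致、越权与刷单、回滚失败。缓解：前置压测、幂等校验、风控规则验证、补偿链路演练。补充：{summary['sec']}。",
--         "里程碑与角色": f"里程碑：{summary['schedule']}。角色：QA负责人统筹策略与门禁，测试工程师执行分层测试，开发与SRE协同定位和修复。",
--         "交付物与度量": f"交付物：测试策略、测试计划、用例集、缺陷报告、测试总结。度量：需求覆盖率、缺陷密度、通过率、回归耗时、线上问题逃逸率。来源文档：{src_names}。",
--     }
--
--     strategy["交付物与度量"] += f" 提示词约束摘要：{prompt_text.strip()[:80]}..."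
--     return strategy
-- ===== SOURCE B (Python) =====
-- from typing import Dict, List, Tuple
--
-- _CATS = [
--     (["必须", "应当", "required", "must", "规则", "流程", "资格", "库存"], 5),
--     (["性能", "并发", "rps", "响应", "latency", "throughput"], 3),
--     (["安全", "权限", "鉴权", "风控", "owasp", "token", "越权"], 3),
--     (["t-", "里程碑", "上线", "计划", "deadline", "release"], 4),
-- ]
--
-- def build_strategy(prompt_text: str, docs: List[Tuple[str, str]]) -> Dict[str, str]:
--     # one pass over the merged stripped lines, filling all four buckets at once
--     buckets: List[List[str]] = [[], [], [], []]
--     for _, text in docs: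
--         for raw in text.splitlines():
--             line = raw.strip()
--             if not line:
--                 continue
--             low = line.lower()
--             for (kws, limit), acc in zip(_CATS, buckets):
--                 if len(acc) < limit and any(k in low for k in kws):
--                     acc.append(line)
--     core, perf, sec, schedule = buckets
--
--     core_s = "；".join(core) if core else "核心业务流程、资格校验、库存一致性"
--     perf_s = "；".join(perf) if perf else "高峰并发与稳定性验证"
--     sec_s = "；".join(sec) if sec else "认证鉴权、越权、数据保护"
--     sched_s = "；".join(schedule) if schedule else "按项目节奏分阶段执行与评审"
--     src_names = "、".join(label for label, _ in docs)
--
--     return {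
--         "策略标题": "Test Strategy Plus 输出 - 业务活动质量保障策略",
--         "质量目标": f"保障关键链路正确性、稳定性与安全性。重点：{core_s}；性能关注：{perf_s}。",
--         "范围_包含": "资格校验、活动参与、库存扣减、订单状态联动、失败回滚、幂等控制、关键接口与前端主流程。",
--         "范围_不包含": "非活动范围的历史模块重构验证、与当前发布无关的低风险边缘特性。",
--         "测试类型与覆盖": "功能+接口为P0，性能压测/稳定性为P1，安全与权限为P1，兼容与可访问性为P2；覆盖正常、异常、边界、并发冲突场景。",
--         "环境与工具": "独立测试环境（网关/服务/缓存/消息队列/数据库）+ API自动化 + UI回归 + 性能压测工具 + 安全扫描工具。",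
--         "测试数据策略": "构造多层级用户与库存数据集，覆盖资格达标/不达标、库存充足/不足、重复提交、失败补偿；敏感数据脱敏。",
--         "准入准出标准": "准入：需求冻结、接口文档可用、环境联通；准出：P0用例通过率100%，P1通过率>=95%，阻塞缺陷清零，高风险项有结论。",
--         "风险与缓解": f"风险：并发超卖、状态不一致、越权与刷单、回滚失败。缓解：前置压测、幂等校验、风控规则验证、补偿链路演练。补充：{sec_s}。",
--         "里程碑与角色": f"里程碑：{sched_s}。角色：QA负责人统筹策略与门禁，测试工程师执行分层测试，开发与SRE协同定位和修复。",
--         "交付物与度量": f"交付物：测试策略、测试计划、用例集、缺陷报告、测试总结。度量：需求覆盖率、缺陷密度、通过率、回归耗时、线上问题逃逸率。来源文档：{src_names}。"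
--                         f" 提示词约束摘要：{prompt_text.strip()[:80]}...",
--     }
-- ===== Notes on version B (the rewrite author's own statement) =====
-- stated objective: alternative
-- what changed: A scans the merged line list four times, one _pick pass per keyword category with an early break at each limit; B makes a single pass over the docs' stripped lines, filling all four capped category buckets at once, then assembles the same strategy dict.
import Mathlib
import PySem

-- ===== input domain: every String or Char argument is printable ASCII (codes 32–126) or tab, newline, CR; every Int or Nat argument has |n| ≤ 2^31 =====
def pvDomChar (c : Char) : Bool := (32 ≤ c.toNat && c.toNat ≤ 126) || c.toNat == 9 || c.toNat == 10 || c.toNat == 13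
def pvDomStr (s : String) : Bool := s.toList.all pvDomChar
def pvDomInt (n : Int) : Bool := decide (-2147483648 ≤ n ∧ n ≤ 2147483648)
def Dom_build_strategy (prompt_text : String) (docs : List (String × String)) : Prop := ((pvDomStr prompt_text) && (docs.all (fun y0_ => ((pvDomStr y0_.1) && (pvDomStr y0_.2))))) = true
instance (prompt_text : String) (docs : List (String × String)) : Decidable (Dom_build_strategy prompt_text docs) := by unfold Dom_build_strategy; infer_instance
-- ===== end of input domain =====

-- B fills all four keyword buckets in ONE pass over the merged lines instead of A's four
-- separate scans (objective: alternative decomposition, same cost class).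
-- Shared constants (identical literals in both Pythons):
def pvKwCore : List String := ["必须", "应当", "required", "must", "规则", "流程", "资格", "库存"]
def pvKwPerf : List String := ["性能", "并发", "rps", "响应", "latency", "throughput"]
def pvKwSec : List String := ["安全", "权限", "鉴权", "风控", "owasp", "token", "越权"]
def pvKwSched : List String := ["t-", "里程碑", "上线", "计划", "deadline", "release"]

-- _collect_lines (same helper in A and in B): [x.strip() for x in text.splitlines() if x.strip()]
def pvCollectLines (text : String) : List String :=
  (PySem.Str.splitlines text).filterMap (fun x =>
    if PySem.Str.strip x = "" then none else some (PySem.Str.strip x))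

-- ===== PORT A =====
-- _pick: scan, append matches, break at limit
def pvPickGo (keywords : List String) (limit : Int) : List String → List String → List String
  | [], out => out
  | line :: rest, out =>
      let low := PySem.Str.lower line
      if keywords.any (fun k => PySem.Str.isIn (PySem.Str.lower k) low) then
        let out' := out ++ [line]
        if limit ≤ (out'.length : Int) then out'
        else pvPickGo keywords limit rest out'
      else pvPickGo keywords limit rest out

def pvPick (lines : List String) (keywords : List String) (limit : Int) : List String :=
  pvPickGo keywords limit lines []

-- _summary_from_docs; the Python dict is a 4-entry literal with distinct literal keys
def pvSummaryFromDocs (docs : List (String × String)) : PySem.Dict String String :=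
  let merged := docs.foldl (fun acc d => acc ++ pvCollectLines d.2) []
  let core := pvPick merged pvKwCore 5
  let perf := pvPick merged pvKwPerf 3
  let sec := pvPick merged pvKwSec 3
  let schedule := pvPick merged pvKwSched 4
  PySem.Dict.mk [
    ("core", if core = [] then "核心业务流程、资格校验、库存一致性" else PySem.Str.join "；" core),
    ("perf", if perf = [] then "高峰并发与稳定性验证" else PySem.Str.join "；" perf),
    ("sec", if sec = [] then "认证鉴权、越权、数据保护" else PySem.Str.join "；" sec),
    ("schedule", if schedule = [] then "按项目节奏分阶段执行与评审" else PySem.Str.join "；" schedule)]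

-- summary['k'] is a literal-key lookup that always hits, so getD is exact here
def build_strategy (prompt_text : String) (docs : List (String × String)) : List (String × String) :=
  let src_names := PySem.Str.join "、" (docs.map (fun p => p.1))
  let summary := pvSummaryFromDocs docs
  let strategy := PySem.Dict.mk [
    ("策略标题", "Test Strategy Plus 输出 - 业务活动质量保障策略"),
    ("质量目标", "保障关键链路正确性、稳定性与安全性。重点：" ++ summary.getD "core" "" ++ "；性能关注：" ++ summary.getD "perf" "" ++ "。"),
    ("范围_包含", "资格校验、活动参与、库存扣减、订单状态联动、失败回滚、幂等控制、关键接口与前端主流程。"),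
    ("范围_不包含", "非活动范围的历史模块重构验证、与当前发布无关的低风险边缘特性。"),
    ("测试类型与覆盖", "功能+接口为P0，性能压测/稳定性为P1，安全与权限为P1，兼容与可访问性为P2；覆盖正常、异常、边界、并发冲突场景。"),
    ("环境与工具", "独立测试环境（网关/服务/缓存/消息队列/数据库）+ API自动化 + UI回归 + 性能压测工具 + 安全扫描工具。"),
    ("测试数据策略", "构造多层级用户与库存数据集，覆盖资格达标/不达标、库存充足/不足、重复提交、失败补偿；敏感数据脱敏。"),
    ("准入准出标准", "准入：需求冻结、接口文档可用、环境联通；准出：P0用例通过率100%，P1通过率>=95%，阻塞缺陷清零，高风险项有结论。"),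
    ("风险与缓解", "风险：并发超卖、状态不一致、越权与刷单、回滚失败。缓解：前置压测、幂等校验、风控规则验证、补偿链路演练。补充：" ++ summary.getD "sec" "" ++ "。"),
    ("里程碑与角色", "里程碑：" ++ summary.getD "schedule" "" ++ "。角色：QA负责人统筹策略与门禁，测试工程师执行分层测试，开发与SRE协同定位和修复。"),
    ("交付物与度量", "交付物：测试策略、测试计划、用例集、缺陷报告、测试总结。度量：需求覆盖率、缺陷密度、通过率、回归耗时、线上问题逃逸率。来源文档：" ++ src_names ++ "。")]
  let strategy := strategy.modify "交付物与度量" ""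
    (fun v => v ++ (" 提示词约束摘要：" ++ PySem.Str.slice (PySem.Str.strip prompt_text) none (some 80) ++ "..."))
  strategy.items

-- ===== PORT B =====
-- _grab: append line to acc if the bucket is not full and a keyword occurs in low
def pvGrab (acc : List String) (keywords : List String) (limit : Int) (low : String) (line : String) : List String :=
  if (acc.length : Int) < limit ∧ (keywords.any fun k => PySem.Str.isIn k low) = true then acc ++ [line]
  else acc

-- the single pass: for each doc, for each stripped nonempty line, update all four buckets
def pvFill (docs : List (String × String)) : List String × List String × List String × List String :=
  docs.foldl (fun st d =>
    (PySem.Str.splitlines d.2).foldl (fun st raw =>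
      let line := PySem.Str.strip raw
      if line = "" then st
      else
        let low := PySem.Str.lower line
        (pvGrab st.1 pvKwCore 5 low line, pvGrab st.2.1 pvKwPerf 3 low line,
         pvGrab st.2.2.1 pvKwSec 3 low line, pvGrab st.2.2.2 pvKwSched 4 low line)) st)
    ([], [], [], [])

def build_strategy_alt (prompt_text : String) (docs : List (String × String)) : List (String × String) :=
  let st := pvFill docs
  let core := st.1
  let perf := st.2.1
  let sec := st.2.2.1
  let schedule := st.2.2.2
  let core_s := if core = [] then "核心业务流程、资格校验、库存一致性" else PySem.Str.join "；" core
  let perf_s := if perf = [] then "高峰并发与稳定性验证" else PySem.Str.join "；" perf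
  let sec_s := if sec = [] then "认证鉴权、越权、数据保护" else PySem.Str.join "；" sec
  let sched_s := if schedule = [] then "按项目节奏分阶段执行与评审" else PySem.Str.join "；" schedule
  let src_names := PySem.Str.join "、" (docs.map (fun p => p.1))
  [("策略标题", "Test Strategy Plus 输出 - 业务活动质量保障策略"),
   ("质量目标", "保障关键链路正确性、稳定性与安全性。重点：" ++ core_s ++ "；性能关注：" ++ perf_s ++ "。"),
   ("范围_包含", "资格校验、活动参与、库存扣减、订单状态联动、失败回滚、幂等控制、关键接口与前端主流程。"),
   ("范围_不包含", "非活动范围的历史模块重构验证、与当前发布无关的低风险边缘特性。"),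
   ("测试类型与覆盖", "功能+接口为P0，性能压测/稳定性为P1，安全与权限为P1，兼容与可访问性为P2；覆盖正常、异常、边界、并发冲突场景。"),
   ("环境与工具", "独立测试环境（网关/服务/缓存/消息队列/数据库）+ API自动化 + UI回归 + 性能压测工具 + 安全扫描工具。"),
   ("测试数据策略", "构造多层级用户与库存数据集，覆盖资格达标/不达标、库存充足/不足、重复提交、失败补偿；敏感数据脱敏。"),
   ("准入准出标准", "准入：需求冻结、接口文档可用、环境联通；准出：P0用例通过率100%，P1通过率>=95%，阻塞缺陷清零，高风险项有结论。"),
   ("风险与缓解", "风险：并发超卖、状态不一致、越权与刷单、回滚失败。缓解：前置压测、幂等校验、风控规则验证、补偿链路演练。补充：" ++ sec_s ++ "。"),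
   ("里程碑与角色", "里程碑：" ++ sched_s ++ "。角色：QA负责人统筹策略与门禁，测试工程师执行分层测试，开发与SRE协同定位和修复。"),
   ("交付物与度量", ("交付物：测试策略、测试计划、用例集、缺陷报告、测试总结。度量：需求覆盖率、缺陷密度、通过率、回归耗时、线上问题逃逸率。来源文档：" ++ src_names ++ "。") ++
      (" 提示词约束摘要：" ++ PySem.Str.slice (PySem.Str.strip prompt_text) none (some 80) ++ "..."))]

-- ===== PRECONDITION & SPEC =====
def Spec_build_strategy (prompt_text : String) (docs : List (String × String)) (out : List (String × String)) : Prop := out = build_strategy_alt prompt_text docs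
instance (prompt_text : String) (docs : List (String × String)) (out : List (String × String)) : Decidable (Spec_build_strategy prompt_text docs out) := by unfold Spec_build_strategy; infer_instance

-- ===== CLAIM (what is proved, stated in full; the proofs are below) =====
def Claim_equal_build_strategy : Prop := ∀ (prompt_text : String) (docs : List (String × String)), Dom_build_strategy prompt_text docs → Spec_build_strategy prompt_text docs (build_strategy prompt_text docs)

-- ===== LEMMAS AND PROOFS =====

-- proof-side: one bucket's single-pass fold, with its accumulator
def pvCat (kws : List String) (lim : Int) (acc : List String) (lines : List String) : List String :=
  lines.foldl (fun a l => pvGrab a kws lim (PySem.Str.lower l) l) acc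

-- A's keyword lists are fixed points of str.lower
theorem pv_kw_lower_core : pvKwCore.map PySem.Str.lower = pvKwCore := by decide
theorem pv_kw_lower_perf : pvKwPerf.map PySem.Str.lower = pvKwPerf := by decide
theorem pv_kw_lower_sec : pvKwSec.map PySem.Str.lower = pvKwSec := by decide
theorem pv_kw_lower_sched : pvKwSched.map PySem.Str.lower = pvKwSched := by decide

theorem pv_any_lower (kws : List String) (h : kws.map PySem.Str.lower = kws) (low : String) :
    (kws.any fun k => PySem.Str.isIn (PySem.Str.lower k) low) = (kws.any fun k => PySem.Str.isIn k low) := by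
  conv_rhs => rw [← h]
  rw [List.any_map]
  rfl

-- characterisation of A's _pick loop
theorem pv_pickGo_eq (kws : List String) (limit : Int) :
    ∀ (lines out : List String), (out.length : Int) < limit →
      pvPickGo kws limit lines out
        = out ++ ((lines.filter fun l => kws.any fun k => PySem.Str.isIn (PySem.Str.lower k) (PySem.Str.lower l)).take (limit.toNat - out.length))
  | [], out, _ => by simp [pvPickGo]
  | line :: rest, out, h => by
      have hlen : (out ++ [line]).length = out.length + 1 := by simp
      simp only [pvPickGo, List.filter_cons]
      by_cases hc : (kws.any fun k => PySem.Str.isIn (PySem.Str.lower k) (PySem.Str.lower line)) = true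
      · simp only [hc, if_true]
        by_cases hb : limit ≤ ((out ++ [line]).length : Int)
        · rw [if_pos hb]
          rw [hlen] at hb
          have h1 : limit.toNat - out.length = 1 := by push_cast at hb; omega
          rw [h1, List.take_succ_cons, List.take_zero]
        · rw [if_neg hb]
          rw [hlen] at hb
          push_cast at hb
          have h2 : ((out ++ [line]).length : Int) < limit := by rw [hlen]; push_cast; omega
          rw [pv_pickGo_eq kws limit rest (out ++ [line]) h2, hlen]
          have h1 : limit.toNat - out.length = (limit.toNat - (out.length + 1)) + 1 := by omega
          rw [h1, List.take_succ_cons]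
          simp
      · simp only [hc, if_false, Bool.false_eq_true]
        exact pv_pickGo_eq kws limit rest out h

theorem pv_cat_cons (kws : List String) (lim : Int) (acc : List String) (l : String) (ls : List String) :
    pvCat kws lim acc (l :: ls) = pvCat kws lim (pvGrab acc kws lim (PySem.Str.lower l) l) ls := rfl

-- characterisation of B's per-bucket fold
theorem pv_cat_eq (kws : List String) (limit : Int) :
    ∀ (lines acc : List String),
      pvCat kws limit acc lines
        = acc ++ ((lines.filter fun l => kws.any fun k => PySem.Str.isIn k (PySem.Str.lower l)).take (limit.toNat - acc.length))
  | [], acc => by simp [pvCat]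
  | line :: rest, acc => by
      rw [pv_cat_cons, List.filter_cons]
      by_cases hc : (kws.any fun k => PySem.Str.isIn k (PySem.Str.lower line)) = true
      · simp only [hc, if_true]
        by_cases hb : (acc.length : Int) < limit
        · rw [show pvGrab acc kws limit (PySem.Str.lower line) line = acc ++ [line] from
            by rw [pvGrab, if_pos ⟨hb, hc⟩]]
          rw [pv_cat_eq kws limit rest (acc ++ [line])]
          have h1 : limit.toNat - acc.length = (limit.toNat - (acc ++ [line]).length) + 1 := by
            simp only [List.length_append, List.length_cons, List.length_nil]; omega
          rw [h1, List.take_succ_cons]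
          simp
        · rw [show pvGrab acc kws limit (PySem.Str.lower line) line = acc from
            by rw [pvGrab, if_neg (fun hh => hb hh.1)]]
          rw [pv_cat_eq kws limit rest acc]
          have h1 : limit.toNat - acc.length = 0 := by omega
          rw [h1]
          simp
      · simp only [hc, if_false, Bool.false_eq_true]
        rw [show pvGrab acc kws limit (PySem.Str.lower line) line = acc from
          by rw [pvGrab, if_neg (fun hh => hc hh.2)]]
        exact pv_cat_eq kws limit rest acc

-- proof-side: the clean (stripped, nonempty) lines of a raw line list
def pvClean (raws : List String) : List String :=
  raws.filterMap (fun x => if PySem.Str.strip x = "" then none else some (PySem.Str.strip x))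

-- proof-side: the body of B's inner fold, named so lemmas can rewrite it
def pvBody (st : List String × List String × List String × List String) (raw : String) :
    List String × List String × List String × List String :=
  let line := PySem.Str.strip raw
  if line = "" then st
  else
    let low := PySem.Str.lower line
    (pvGrab st.1 pvKwCore 5 low line, pvGrab st.2.1 pvKwPerf 3 low line,
     pvGrab st.2.2.1 pvKwSec 3 low line, pvGrab st.2.2.2 pvKwSched 4 low line)

theorem pv_collect_eq_clean (text : String) :
    pvCollectLines text = pvClean (PySem.Str.splitlines text) := rfl

theorem pv_cat_append (kws : List String) (lim : Int) (acc xs ys : List String) :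
    pvCat kws lim acc (xs ++ ys) = pvCat kws lim (pvCat kws lim acc xs) ys :=
  List.foldl_append

-- B's fused pass splits into the four independent bucket folds over the clean lines
theorem pv_fill_inner (raws : List String) :
    ∀ st, raws.foldl pvBody st
      = (pvCat pvKwCore 5 st.1 (pvClean raws), pvCat pvKwPerf 3 st.2.1 (pvClean raws),
         pvCat pvKwSec 3 st.2.2.1 (pvClean raws), pvCat pvKwSched 4 st.2.2.2 (pvClean raws)) := by
  induction raws with
  | nil => intro st; simp [pvClean, pvCat]
  | cons raw rest ih =>
      intro st
      by_cases hs : PySem.Str.strip raw = ""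
      · have hb : pvBody st raw = st := by simp [pvBody, hs]
        have hcl : pvClean (raw :: rest) = pvClean rest := by simp [pvClean, hs]
        rw [List.foldl_cons, hb, hcl]
        exact ih st
      · have hb : pvBody st raw
            = (pvGrab st.1 pvKwCore 5 (PySem.Str.lower (PySem.Str.strip raw)) (PySem.Str.strip raw),
               pvGrab st.2.1 pvKwPerf 3 (PySem.Str.lower (PySem.Str.strip raw)) (PySem.Str.strip raw),
               pvGrab st.2.2.1 pvKwSec 3 (PySem.Str.lower (PySem.Str.strip raw)) (PySem.Str.strip raw),
               pvGrab st.2.2.2 pvKwSched 4 (PySem.Str.lower (PySem.Str.strip raw)) (PySem.Str.strip raw)) := by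
          simp [pvBody, hs]
        have hcl : pvClean (raw :: rest) = PySem.Str.strip raw :: pvClean rest := by
          simp [pvClean, hs]
        rw [List.foldl_cons, hb, hcl, ih]
        simp only [pv_cat_cons]

theorem pv_fill_outer :
    ∀ (docs : List (String × String)) st,
      docs.foldl (fun st d => (PySem.Str.splitlines d.2).foldl pvBody st) st
        = (pvCat pvKwCore 5 st.1 (docs.flatMap fun d => pvCollectLines d.2),
           pvCat pvKwPerf 3 st.2.1 (docs.flatMap fun d => pvCollectLines d.2),
           pvCat pvKwSec 3 st.2.2.1 (docs.flatMap fun d => pvCollectLines d.2),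
           pvCat pvKwSched 4 st.2.2.2 (docs.flatMap fun d => pvCollectLines d.2)) := by
  intro docs
  induction docs with
  | nil => intro st; simp [pvCat]
  | cons d rest ih =>
      intro st
      rw [List.foldl_cons, pv_fill_inner _ st, ih]
      simp only [List.flatMap_cons, pv_collect_eq_clean, pv_cat_append]

theorem pv_fill_eq (docs : List (String × String)) :
    pvFill docs
      = (pvCat pvKwCore 5 [] (docs.flatMap fun d => pvCollectLines d.2),
         pvCat pvKwPerf 3 [] (docs.flatMap fun d => pvCollectLines d.2),
         pvCat pvKwSec 3 [] (docs.flatMap fun d => pvCollectLines d.2),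
         pvCat pvKwSched 4 [] (docs.flatMap fun d => pvCollectLines d.2)) :=
  pv_fill_outer docs ([], [], [], [])

-- each of A's four picks equals the corresponding bucket of B's single pass
theorem pv_pick_eq_cat (kws : List String) (h : kws.map PySem.Str.lower = kws)
    (lim : Int) (hl : (0 : Int) < lim) (lines : List String) :
    pvPick lines kws lim = pvCat kws lim [] lines := by
  rw [pvPick, pv_pickGo_eq kws lim lines [] (by simpa using hl), pv_cat_eq kws lim lines []]
  have : (fun l => kws.any fun k => PySem.Str.isIn (PySem.Str.lower k) (PySem.Str.lower l))
       = (fun l => kws.any fun k => PySem.Str.isIn k (PySem.Str.lower l)) :=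
    funext fun l => pv_any_lower kws h (PySem.Str.lower l)
  rw [this]

-- ===== VERDICT (by name: the statement is the Claim_ definition above) =====
theorem build_strategy_spec : Claim_equal_build_strategy := by
  intro prompt_text docs _hdom
  unfold Spec_build_strategy
  have hmerged : docs.foldl (fun acc d => acc ++ pvCollectLines d.2) []
      = docs.flatMap (fun d => pvCollectLines d.2) := by
    simpa using PySem.List.foldl_append_eq_flatMap (fun d => pvCollectLines d.2) docs []
  have hfill : pvFill docs
      = (pvPick (docs.foldl (fun acc d => acc ++ pvCollectLines d.2) []) pvKwCore 5,
         pvPick (docs.foldl (fun acc d => acc ++ pvCollectLines d.2) []) pvKwPerf 3,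
         pvPick (docs.foldl (fun acc d => acc ++ pvCollectLines d.2) []) pvKwSec 3,
         pvPick (docs.foldl (fun acc d => acc ++ pvCollectLines d.2) []) pvKwSched 4) := by
    rw [pv_fill_eq, hmerged,
        pv_pick_eq_cat pvKwCore pv_kw_lower_core 5 (by norm_num),
        pv_pick_eq_cat pvKwPerf pv_kw_lower_perf 3 (by norm_num),
        pv_pick_eq_cat pvKwSec pv_kw_lower_sec 3 (by norm_num),
        pv_pick_eq_cat pvKwSched pv_kw_lower_sched 4 (by norm_num)]
  simp only [build_strategy, build_strategy_alt, pvSummaryFromDocs, hfill]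
  simp [PySem.Dict.getD, PySem.Dict.get?, PySem.Dict.modify, PySem.Dict.insert]
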